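-- pv_equiv track=rewrite | github.com/MinsangKong/Study | BinarySearch/Programmers/1.py | solution
-- ===== SOURCE A (Python) =====
-- def solution(answers):
--     answer = []
--     case1 = [1,2,3,4,5]
--     count1 = 0
--     case2 = [2,1,2,3,2,4,2,5]
--     count2 = 0
--     case3 = [3,3,1,1,2,2,4,4,5,5]
--     count3 = 0
--     for i in range(len(answers)):
--         if answers[i] == case1[i%5] :
--             count1+=1
--         if answers[i] == case2[i%8] :
--             count2+=1
--         if answers[i] == case3[i%10] :
--             count3+=1
--
--     if count3 == count2 == count1 :
--         answer.extend([1,2,3])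
--     elif count1 > count2 and count1 > count3 :
--         answer.append(1)
--     elif count2 > count1 and count2 > count3 :
--         answer.append(2)
--     elif count3 > count1 and count3 > count2 :
--         answer.append(3)
--     elif count1 == count2:
--         answer.extend([1,2])
--     elif count1 == count3:
--         answer.extend([1,3])
--     elif count2 == count3:
--         answer.extend([2,3])
--     return answer
-- ===== SOURCE B (Python) =====
-- def solution(answers):
--     # One pass builds a frequency table keyed by (position mod 40, answer);
--     # the per-pattern scores are then 40 table lookups each (patterns repeat with period lcm(5,8,10)=40).
--     freq = {}
--     for i, a in enumerate(answers):
--         key = (i % 40, a)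
--         freq[key] = freq.get(key, 0) + 1
--     patterns = [[1, 2, 3, 4, 5],
--                 [2, 1, 2, 3, 2, 4, 2, 5],
--                 [3, 3, 1, 1, 2, 2, 4, 4, 5, 5]]
--     counts = [sum(freq.get((r, p[r % len(p)]), 0) for r in range(40)) for p in patterns]
--     m = max(counts)
--     return [k + 1 for k, c in enumerate(counts) if c == m]
-- ===== Notes on version B (the rewrite author's own statement) =====
-- stated objective: alternative
-- what changed: B builds a frequency dictionary keyed by (position mod 40, answer) in one pass (patterns repeat with period lcm(5,8,10)=40), derives each pattern's score by 40 dictionary lookups instead of comparing every answer against each pattern, and picks the winners by a generic max-and-filter instead of A's 7-branch tie cascade.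
import Mathlib
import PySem

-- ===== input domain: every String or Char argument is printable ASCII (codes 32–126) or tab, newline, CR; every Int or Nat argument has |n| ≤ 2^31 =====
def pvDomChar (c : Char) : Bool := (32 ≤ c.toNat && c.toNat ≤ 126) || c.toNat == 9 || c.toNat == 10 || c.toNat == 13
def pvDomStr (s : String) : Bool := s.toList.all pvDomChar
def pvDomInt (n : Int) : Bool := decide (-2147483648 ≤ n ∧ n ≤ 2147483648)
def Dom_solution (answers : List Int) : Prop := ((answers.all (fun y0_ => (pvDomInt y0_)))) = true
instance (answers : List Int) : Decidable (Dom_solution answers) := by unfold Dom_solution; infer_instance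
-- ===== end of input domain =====

-- B replaces A's per-element three-way pattern comparison and 7-branch tie cascade by a
-- frequency table keyed by (position mod 40, answer) built in one pass, 40 table lookups
-- per pattern, and a generic max-and-filter (objective: alternative; same O(n) cost).

-- ===== PORT A =====
def solution (answers : List Int) : List Int :=
  let case1 : List Int := [1, 2, 3, 4, 5]
  let case2 : List Int := [2, 1, 2, 3, 2, 4, 2, 5]
  let case3 : List Int := [3, 3, 1, 1, 2, 2, 4, 4, 5, 5]
  let s :=
    (PySem.List.pyRange 0 (answers.length : Int) 1).foldl
      (fun (s : Int × Int × Int) i =>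
        let s := if PySem.List.pyGetD answers i 0 = PySem.List.pyGetD case1 (PySem.Int.mod i 5) 0
                 then (s.1 + 1, s.2.1, s.2.2) else s
        let s := if PySem.List.pyGetD answers i 0 = PySem.List.pyGetD case2 (PySem.Int.mod i 8) 0
                 then (s.1, s.2.1 + 1, s.2.2) else s
        if PySem.List.pyGetD answers i 0 = PySem.List.pyGetD case3 (PySem.Int.mod i 10) 0
        then (s.1, s.2.1, s.2.2 + 1) else s)
      (0, 0, 0)
  let count1 := s.1
  let count2 := s.2.1
  let count3 := s.2.2
  if count3 = count2 ∧ count2 = count1 then [1, 2, 3]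
  else if count1 > count2 ∧ count1 > count3 then [1]
  else if count2 > count1 ∧ count2 > count3 then [2]
  else if count3 > count1 ∧ count3 > count2 then [3]
  else if count1 = count2 then [1, 2]
  else if count1 = count3 then [1, 3]
  else if count2 = count3 then [2, 3]
  else []

-- ===== PORT B =====
-- freq[(i % 40, a)] = freq.get((i % 40, a), 0) + 1  over enumerate(answers)
def buildFreq (answers : List Int) : PySem.Dict (Int × Int) Int :=
  (PySem.List.enumerate answers 0).foldl
    (fun d q =>
      d.insert (PySem.Int.mod q.1 40, q.2) (d.getD (PySem.Int.mod q.1 40, q.2) 0 + 1))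
    PySem.Dict.empty

-- sum(freq.get((r, p[r % len(p)]), 0) for r in range(40))
def scoreOf (freq : PySem.Dict (Int × Int) Int) (p : List Int) : Int :=
  ((PySem.List.pyRange 0 40 1).map
    (fun r => freq.getD (r, PySem.List.pyGetD p (PySem.Int.mod r (p.length : Int)) 0) 0)).sum

def solution_alt (answers : List Int) : List Int :=
  let freq := buildFreq answers
  let patterns : List (List Int) :=
    [[1, 2, 3, 4, 5], [2, 1, 2, 3, 2, 4, 2, 5], [3, 3, 1, 1, 2, 2, 4, 4, 5, 5]]
  let counts := patterns.map (scoreOf freq)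
  let m := (PySem.List.max? counts (fun y => y)).getD 0
  ((PySem.List.enumerate counts 0).filter (fun q => q.2 == m)).map (fun q => q.1 + 1)

-- ===== PRECONDITION & SPEC =====
def Spec_solution (answers : List Int) (out : List Int) : Prop := out = solution_alt answers
instance (answers : List Int) (out : List Int) : Decidable (Spec_solution answers out) := by unfold Spec_solution; infer_instance

-- ===== CLAIM (what is proved, stated in full; the proofs are below) =====
def Claim_equal_solution : Prop := ∀ (answers : List Int), Dom_solution answers → Spec_solution answers (solution answers)

-- ===== LEMMAS AND PROOFS =====

theorem foldl_add_shift (g : Int → Int) (l : List Int) (a : Int) :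
    l.foldl (fun s i => s + g i) a = a + l.foldl (fun s i => s + g i) 0 := by
  induction l generalizing a with
  | nil => simp
  | cons x t ih => simp only [List.foldl_cons]
                   rw [ih (a + g x), ih (0 + g x)]; ring

theorem foldl_triple (g1 g2 g3 : Int → Int) (l : List Int) (a b c : Int) :
    l.foldl (fun (s : Int × Int × Int) i => (s.1 + g1 i, s.2.1 + g2 i, s.2.2 + g3 i)) (a, b, c)
      = (a + l.foldl (fun s i => s + g1 i) 0,
         b + l.foldl (fun s i => s + g2 i) 0,
         c + l.foldl (fun s i => s + g3 i) 0) := by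
  induction l generalizing a b c with
  | nil => simp
  | cons x t ih =>
      simp only [List.foldl_cons]
      rw [ih, foldl_add_shift g1 t (0 + g1 x), foldl_add_shift g2 t (0 + g2 x),
         foldl_add_shift g3 t (0 + g3 x)]
      simp only [Prod.mk.injEq]
      refine ⟨by ring, by ring, by ring⟩

theorem step_eq (p q r : Int → Prop) [DecidablePred p] [DecidablePred q] [DecidablePred r] :
    (fun (s : Int × Int × Int) i =>
      let s' := if p i then (s.1 + 1, s.2.1, s.2.2) else s
      let s'' := if q i then (s'.1, s'.2.1 + 1, s'.2.2) else s'
      if r i then (s''.1, s''.2.1, s''.2.2 + 1) else s'')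
    = fun s i => (s.1 + (if p i then 1 else 0), s.2.1 + (if q i then 1 else 0),
                  s.2.2 + (if r i then 1 else 0)) := by
  funext s i
  dsimp only
  split_ifs <;> simp

-- the summed indicator at one key, when the key's residue is absent from rs
theorem sum_ite_pair_zero (rs : List Int) (t : Int → Int) (x : Int × Int) (hx : x.1 ∉ rs) :
    (rs.map (fun r => if x = (r, t r) then (1 : Int) else 0)).sum = 0 := by
  induction rs with
  | nil => simp
  | cons r rs ih =>
      simp only [List.map_cons, List.sum_cons]
      rw [if_neg (by rintro rfl; exact hx List.mem_cons_self)]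
      simpa using ih (fun h => hx (List.mem_cons_of_mem _ h))

-- the summed indicator at one key over a nodup residue list containing x.1
theorem sum_ite_pair (rs : List Int) (t : Int → Int) (x : Int × Int)
    (hnd : rs.Nodup) (hx : x.1 ∈ rs) :
    (rs.map (fun r => if x = (r, t r) then (1 : Int) else 0)).sum
      = if x.2 = t x.1 then 1 else 0 := by
  induction rs with
  | nil => simp at hx
  | cons r rs ih =>
      simp only [List.map_cons, List.sum_cons]
      rcases List.nodup_cons.mp hnd with ⟨hr, hnd'⟩
      by_cases h1 : x.1 = r
      · subst h1
        rw [sum_ite_pair_zero rs t x hr, add_zero]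
        by_cases h2 : x.2 = t x.1
        · simp [Prod.ext_iff, h2]
        · simp [Prod.ext_iff, h2]
      · rw [if_neg (by rintro rfl; exact h1 rfl)]
        rw [ih hnd' (by rcases List.mem_cons.mp hx with h | h; exact absurd h h1; exact h)]
        simp

-- Σ_{r∈rs} L.count (r, t r) = countP over L, for L whose residues all lie in nodup rs
theorem sum_count_pairs (L : List (Int × Int)) (rs : List Int) (t : Int → Int)
    (hnd : rs.Nodup) (hL : ∀ p ∈ L, p.1 ∈ rs) :
    (rs.map (fun r => ((L.count (r, t r) : Int)))).sum
      = ((L.countP (fun p => p.2 == t p.1) : Int)) := by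
  induction L with
  | nil => simp
  | cons x L ih =>
      simp only [List.count_cons, Nat.cast_add, Nat.cast_ite, Nat.cast_one, Nat.cast_zero,
        beq_iff_eq]
      rw [PySem.List.sum_map_add_int rs (fun r => ((L.count (r, t r) : Int)))
            (fun r => if x = (r, t r) then 1 else 0)]
      rw [ih (fun p hp => hL p (List.mem_cons_of_mem _ hp)),
          sum_ite_pair rs t x hnd (hL x List.mem_cons_self)]
      rw [List.countP_cons]
      push_cast
      simp [beq_iff_eq]

-- B's score of a pattern equals A's direct count, for a pattern of positive length dividing 40
theorem scoreOf_eq (answers : List Int) (p : List Int) (m : Int)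
    (hm : (p.length : Int) = m) (hlpos : (0 : Int) < m) (hdvd : m ∣ 40) :
    scoreOf (buildFreq answers) p
      = (PySem.List.pyRange 0 (answers.length : Int) 1).foldl
          (fun s i => s + (if PySem.List.pyGetD answers i 0 =
              PySem.List.pyGetD p (PySem.Int.mod i m) 0 then 1 else 0)) 0 := by
  subst hm
  have hfreq : buildFreq answers
      = PySem.Dict.counter
          ((PySem.List.enumerate answers 0).map (fun q => (PySem.Int.mod q.1 40, q.2))) := by
    unfold buildFreq
    rw [← PySem.Dict.foldl_insert_getD_add_one_eq_counter, List.foldl_map]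
  have hmm : ∀ i : Int,
      PySem.List.pyGetD p (PySem.Int.mod (PySem.Int.mod i 40) (p.length : Int)) 0
        = PySem.List.pyGetD p (PySem.Int.mod i (p.length : Int)) 0 := by
    intro i
    have h40 : (0 : Int) < 40 := by norm_num
    rw [PySem.Int.mod_eq_emod_of_pos hlpos, PySem.Int.mod_eq_emod_of_pos hlpos,
        PySem.Int.mod_eq_emod_of_pos h40, Int.emod_emod_of_dvd i hdvd]
  unfold scoreOf
  rw [hfreq]
  simp only [PySem.Dict.getD_counter]
  rw [sum_count_pairs ((PySem.List.enumerate answers 0).map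
        (fun q => (PySem.Int.mod q.1 40, q.2)))
      (PySem.List.pyRange 0 40 1)
      (fun r => PySem.List.pyGetD p (PySem.Int.mod r (p.length : Int)) 0)
      (by decide)
      (by
        intro q hq
        rcases List.mem_map.mp hq with ⟨z, _, rfl⟩
        rw [PySem.List.mem_pyRange_one]
        exact ⟨PySem.Int.mod_nonneg _ (by norm_num), PySem.Int.mod_lt _ (by norm_num)⟩)]
  rw [PySem.List.foldl_add, zero_add]
  rw [List.countP_map, PySem.List.enumerate_eq_map_pyRange answers 0, List.countP_map]
  have hlen : PySem.List.len answers = (answers.length : Int) := by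
    simp [PySem.List.len]
  rw [hlen, ← PySem.List.sum_map_ite_one_zero]
  apply congrArg List.sum
  apply List.map_congr_left
  intro i _
  simp only [Function.comp, beq_iff_eq, hmm i]

theorem cascade_eq_pick (c1 c2 c3 : Int) :
    (if c3 = c2 ∧ c2 = c1 then ([1, 2, 3] : List Int)
     else if c1 > c2 ∧ c1 > c3 then [1]
     else if c2 > c1 ∧ c2 > c3 then [2]
     else if c3 > c1 ∧ c3 > c2 then [3]
     else if c1 = c2 then [1, 2]
     else if c1 = c3 then [1, 3]
     else if c2 = c3 then [2, 3]
     else [])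
    = ((PySem.List.enumerate [c1, c2, c3] 0).filter
         (fun q => q.2 == (PySem.List.max? [c1, c2, c3] (fun y => y)).getD 0)).map
        (fun q => q.1 + 1) := by
  obtain ⟨M, hMdef, hub1, hub2, hub3, hmem⟩ :
      ∃ M, (PySem.List.max? [c1, c2, c3] (fun y => y)).getD 0 = M ∧
        c1 ≤ M ∧ c2 ≤ M ∧ c3 ≤ M ∧ (M = c1 ∨ M = c2 ∨ M = c3) := by
    refine ⟨_, rfl, ?_⟩
    simp [PySem.List.max?]
    split_ifs <;> simp <;> split_ifs <;> simp <;> omega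
  rw [hMdef]
  by_cases b1 : c1 = M <;> by_cases b2 : c2 = M <;> by_cases b3 : c3 = M <;>
    simp [PySem.List.enumerate, List.filter_nil, beq_iff_eq, b1, b2, b3] <;>
    first | rfl | omega | (split_ifs <;> first | rfl | omega)

theorem solution_eq (answers : List Int) : solution answers = solution_alt answers := by
  unfold solution solution_alt
  dsimp only
  rw [step_eq, foldl_triple]
  simp only [List.map_cons, List.map_nil]
  rw [← scoreOf_eq answers [1,2,3,4,5] 5 (by norm_num) (by norm_num) (by norm_num),
      ← scoreOf_eq answers [2,1,2,3,2,4,2,5] 8 (by norm_num) (by norm_num) (by norm_num),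
      ← scoreOf_eq answers [3,3,1,1,2,2,4,4,5,5] 10 (by norm_num) (by norm_num) (by norm_num)]
  norm_num
  exact cascade_eq_pick _ _ _

-- ===== VERDICT (by name: the statement is the Claim_ definition above) =====
theorem solution_spec : Claim_equal_solution := by
  intro answers _
  unfold Spec_solution
  exact solution_eq answers
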